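-- pv_equiv track=rewrite | github.com/plakato/song-lyrics-analysis | evaluation/rhyme_detector_v3.py | get_phonemes_after_last_stress
-- ===== SOURCE A (Python) =====
-- def get_phonemes_after_last_stress(line):
--     relevant = []
--     idx = 0
--     for i in range(len(line)-1, -1, -1):
--         _, v, c2 = line[i]
--         v = ' '.join(v)
--         c2 = ' '.join(c2)
--         if '1' in v or '2' in v:
--             relevant = [v, c2]
--             idx = i + 1
--             break
--     while idx < len(line):
--         c1, v, c2 = line[idx]
--         relevant.extend([' '.join(c1), ' '.join(v), ' '.join(c2)])
--         idx += 1
--     return relevant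
-- ===== SOURCE B (Python) =====
-- def get_phonemes_after_last_stress(line):
--     # Single forward pass: a stressed syllable resets the accumulator to its
--     # vowel+coda; any other syllable appends its full onset/vowel/coda.
--     result = []
--     for c1, v, c2 in line:
--         v = ' '.join(v)
--         if '1' in v or '2' in v:
--             result = [v, ' '.join(c2)]
--         else:
--             result.append(' '.join(c1))
--             result.append(v)
--             result.append(' '.join(c2))
--     return result
-- ===== Notes on version B (the rewrite author's own statement) =====
-- stated objective: simpler
-- what changed: Replaces A's backward scan for the last stressed syllable plus a separate forward emit loop with a single forward pass whose accumulator is reset to [vowel, coda] at each stressed syllable.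
import Mathlib
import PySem

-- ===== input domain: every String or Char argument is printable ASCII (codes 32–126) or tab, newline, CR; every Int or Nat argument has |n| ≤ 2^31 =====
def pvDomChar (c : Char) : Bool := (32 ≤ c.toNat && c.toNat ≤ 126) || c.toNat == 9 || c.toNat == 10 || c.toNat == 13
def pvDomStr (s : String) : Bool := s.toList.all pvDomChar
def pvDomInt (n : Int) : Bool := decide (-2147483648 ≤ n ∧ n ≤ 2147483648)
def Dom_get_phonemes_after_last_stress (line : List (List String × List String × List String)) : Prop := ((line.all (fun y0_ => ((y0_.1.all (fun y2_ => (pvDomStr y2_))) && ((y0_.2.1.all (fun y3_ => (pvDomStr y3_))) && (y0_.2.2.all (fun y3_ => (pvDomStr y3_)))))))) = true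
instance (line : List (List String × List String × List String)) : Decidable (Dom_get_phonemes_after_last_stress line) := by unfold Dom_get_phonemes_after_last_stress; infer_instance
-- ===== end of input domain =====

-- B replaces A's backward scan for the last stressed syllable followed by a second
-- forward emit loop with ONE forward pass whose accumulator is reset at every
-- stressed syllable (objective: simpler, same asymptotic cost).

-- ===== PORT A =====
-- backward 'for i in range(len(line)-1, -1, -1)' with break: recursion on i;
-- line[i] is always in range here (i < len(line)), so getD is exact.
def pvAback (line : List (List String × List String × List String)) :
    Nat → List String × Nat
  | 0 => ([], 0)
  | i + 1 =>
    let t := line.getD i ([], [], [])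
    let v := PySem.Str.join " " t.2.1
    let c2 := PySem.Str.join " " t.2.2
    if PySem.Str.isIn "1" v || PySem.Str.isIn "2" v then ([v, c2], i + 1)
    else pvAback line i

-- 'while idx < len(line)' emitting line[idx]: structural recursion on the suffix
def pvAloop : List (List String × List String × List String) → List String → List String
  | [], relevant => relevant
  | (c1, v, c2) :: rest, relevant =>
      pvAloop rest (relevant ++
        [PySem.Str.join " " c1, PySem.Str.join " " v, PySem.Str.join " " c2])

def get_phonemes_after_last_stress
    (line : List (List String × List String × List String)) : List String :=
  pvAloop (line.drop (pvAback line line.length).2) (pvAback line line.length).1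

-- ===== PORT B =====
def get_phonemes_after_last_stress_alt
    (line : List (List String × List String × List String)) : List String :=
  line.foldl (fun result t =>
    let v := PySem.Str.join " " t.2.1
    if PySem.Str.isIn "1" v || PySem.Str.isIn "2" v then
      [v, PySem.Str.join " " t.2.2]
    else
      result ++ [PySem.Str.join " " t.1, v, PySem.Str.join " " t.2.2]) []

-- ===== PRECONDITION & SPEC =====
def Spec_get_phonemes_after_last_stress (line : List (List String × List String × List String)) (out : List String) : Prop := out = get_phonemes_after_last_stress_alt line
instance (line : List (List String × List String × List String)) (out : List String) : Decidable (Spec_get_phonemes_after_last_stress line out) := by unfold Spec_get_phonemes_after_last_stress; infer_instance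

-- ===== CLAIM (what is proved, stated in full; the proofs are below) =====
def Claim_equal_get_phonemes_after_last_stress : Prop := ∀ (line : List (List String × List String × List String)), Dom_get_phonemes_after_last_stress line → Spec_get_phonemes_after_last_stress line (get_phonemes_after_last_stress line)

-- ===== LEMMAS AND PROOFS =====

def pvStress (t : List String × List String × List String) : Bool :=
  PySem.Str.isIn "1" (PySem.Str.join " " t.2.1) ||
  PySem.Str.isIn "2" (PySem.Str.join " " t.2.1)

def pvTriple (t : List String × List String × List String) : List String :=
  [PySem.Str.join " " t.1, PySem.Str.join " " t.2.1, PySem.Str.join " " t.2.2]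

theorem pvAloop_eq (xs : List (List String × List String × List String))
    (rel : List String) : pvAloop xs rel = rel ++ xs.flatMap pvTriple := by
  induction xs generalizing rel with
  | nil => simp [pvAloop]
  | cons h t ih =>
    obtain ⟨c1, v, c2⟩ := h
    simp [pvAloop, ih, pvTriple, List.flatMap_cons]

theorem pvAback_le (line : List (List String × List String × List String)) :
    ∀ i, (pvAback line i).2 ≤ i := by
  intro i
  induction i with
  | zero => simp [pvAback]
  | succ n ih =>
    simp only [pvAback]
    split
    · simp
    · exact ih.trans (Nat.le_succ n)

theorem pvAback_append (line : List (List String × List String × List String))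
    (t : List String × List String × List String) :
    ∀ i, i ≤ line.length → pvAback (line ++ [t]) i = pvAback line i := by
  intro i
  induction i with
  | zero => intro _; simp [pvAback]
  | succ n ih =>
    intro h
    have hg : (line ++ [t]).getD n (([], [], []) :
        List String × List String × List String) = line.getD n ([], [], []) := by
      have hn : n < line.length := by omega
      simp [List.getD, List.getElem?_append_left hn]
    simp only [pvAback, hg]
    split
    · rfl
    · exact ih (by omega)

theorem A_snoc (line : List (List String × List String × List String))
    (t : List String × List String × List String) :
    get_phonemes_after_last_stress (line ++ [t]) =
      if pvStress t then
        [PySem.Str.join " " t.2.1, PySem.Str.join " " t.2.2]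
      else get_phonemes_after_last_stress line ++ pvTriple t := by
  unfold get_phonemes_after_last_stress
  have hlen : (line ++ [t]).length = line.length + 1 := by simp
  rw [hlen]
  have hget : (line ++ [t]).getD line.length (([], [], []) :
      List String × List String × List String) = t := by
    simp [List.getD]
  by_cases hs : pvStress t
  · have hs' : (PySem.Str.isIn "1" (PySem.Str.join " " t.2.1) ||
        PySem.Str.isIn "2" (PySem.Str.join " " t.2.1)) = true := hs
    have hb : pvAback (line ++ [t]) (line.length + 1) =
        ([PySem.Str.join " " t.2.1, PySem.Str.join " " t.2.2], line.length + 1) := by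
      simp only [pvAback, hget]
      rw [if_pos hs']
    rw [hb, if_pos hs]
    have hd : (line ++ [t]).drop (line.length + 1) = [] := by simp
    rw [hd]
    rfl
  · have hs' : (PySem.Str.isIn "1" (PySem.Str.join " " t.2.1) ||
        PySem.Str.isIn "2" (PySem.Str.join " " t.2.1)) = false := by
      simpa [pvStress] using hs
    have hb : pvAback (line ++ [t]) (line.length + 1) = pvAback line line.length := by
      simp only [pvAback, hget]
      rw [if_neg (by rw [hs']; simp)]
      exact pvAback_append line t line.length le_rfl
    rw [hb, if_neg hs]
    have hle := pvAback_le line line.length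
    rw [List.drop_append_of_le_length hle, pvAloop_eq, pvAloop_eq]
    simp

theorem B_snoc (line : List (List String × List String × List String))
    (t : List String × List String × List String) :
    get_phonemes_after_last_stress_alt (line ++ [t]) =
      if pvStress t then
        [PySem.Str.join " " t.2.1, PySem.Str.join " " t.2.2]
      else get_phonemes_after_last_stress_alt line ++ pvTriple t := by
  unfold get_phonemes_after_last_stress_alt
  rw [List.foldl_append]
  simp only [pvStress, pvTriple]
  split <;> simp_all

-- ===== VERDICT (by name: the statement is the Claim_ definition above) =====
theorem get_phonemes_after_last_stress_spec : Claim_equal_get_phonemes_after_last_stress := by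
  intro line _
  unfold Spec_get_phonemes_after_last_stress
  induction line using List.reverseRecOn with
  | nil => rfl
  | append_singleton xs t ih =>
    rename_i hdom
    have hx : Dom_get_phonemes_after_last_stress xs := by
      simp only [Dom_get_phonemes_after_last_stress, List.all_append,
        Bool.and_eq_true] at hdom ⊢
      exact hdom.1
    rw [A_snoc, B_snoc, ih hx]
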